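-- pv_equiv track=rewrite | github.com/Sarthak3/Alternate-Splicing | code/preprocess.py | convert_out_to_five_splicing_sites_for_5ss
-- ===== SOURCE A (Python) =====
-- def convert_out_to_five_splicing_sites_for_5ss(splicingdist):
-- 	cnt=0
-- 	five_splicingdist=[]
-- 	for x in splicingdist:
-- 		s=0
-- 		vec=[]
-- 		for i in range(len(x)):
-- 			# SD1
-- 			if i==0:
-- 				vec.append(x[i])
--
-- 			# SD2, SDCrpt
-- 			elif i==44 or i==79 :
-- 				vec.append(s)
-- 				vec.append(x[i])
-- 				s=0
-- 			# SDN1 and SDN2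
-- 			elif (i>6 and i<32) or (i>49 and i<75):
-- 				s+=x[i]
--
-- 		five_splicingdist.append(vec)
--
-- 	return five_splicingdist
-- ===== SOURCE B (Python) =====
-- def _row(x):
--     vec = []
--     if len(x) > 0:
--         vec.append(x[0])
--     if len(x) > 44:
--         vec.append(sum(x[7:32]))
--         vec.append(x[44])
--     if len(x) > 79:
--         vec.append(sum(x[50:75]))
--         vec.append(x[79])
--     return vec
--
--
-- def convert_out_to_five_splicing_sites_for_5ss(splicingdist):
--     return [_row(x) for x in splicingdist]
-- ===== Notes on version B (the rewrite author's own statement) =====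
-- stated objective: simpler
-- what changed: Replaces the per-index accumulator loop with direct slice sums sum(x[7:32]) and sum(x[50:75]) plus length-guarded picks of x[0], x[44], x[79], built per row by a comprehension.
import Mathlib
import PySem

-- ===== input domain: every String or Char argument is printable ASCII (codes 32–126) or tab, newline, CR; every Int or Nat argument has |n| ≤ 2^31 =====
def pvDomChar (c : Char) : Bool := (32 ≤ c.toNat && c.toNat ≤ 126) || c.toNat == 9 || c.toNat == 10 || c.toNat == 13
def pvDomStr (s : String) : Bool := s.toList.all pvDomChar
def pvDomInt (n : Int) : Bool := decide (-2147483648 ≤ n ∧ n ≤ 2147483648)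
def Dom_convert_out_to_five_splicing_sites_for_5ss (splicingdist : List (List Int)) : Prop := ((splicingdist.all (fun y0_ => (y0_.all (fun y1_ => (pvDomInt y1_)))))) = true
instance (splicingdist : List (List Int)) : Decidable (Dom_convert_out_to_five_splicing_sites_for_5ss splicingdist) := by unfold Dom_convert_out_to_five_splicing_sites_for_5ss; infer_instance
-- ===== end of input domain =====

-- B replaces A's per-index accumulator loop with direct slice sums and length-guarded picks (objective: simpler).

-- ===== PORT A =====
-- inner loop body of A: state = (s, vec), i the loop index of `for i in range(len(x))`
def pvStepA (x : List Int) (st : Int × List Int) (i : Nat) : Int × List Int :=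
  if i = 0 then (st.1, st.2 ++ [x.getD i 0])
  else if i = 44 ∨ i = 79 then (0, st.2 ++ [st.1, x.getD i 0])
  else if (6 < i ∧ i < 32) ∨ (49 < i ∧ i < 75) then (st.1 + x.getD i 0, st.2)
  else st

def pvRowA (x : List Int) : List Int :=
  ((List.range x.length).foldl (pvStepA x) (0, [])).2

def convert_out_to_five_splicing_sites_for_5ss (splicingdist : List (List Int)) : List (List Int) :=
  splicingdist.foldl (fun acc x => acc ++ [pvRowA x]) []

-- ===== PORT B =====
def pvRowB (x : List Int) : List Int :=
  (if 0 < x.length then [x.getD 0 0] else [])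
  ++ (if 44 < x.length then [(PySem.List.slice x (some 7) (some 32)).sum, x.getD 44 0] else [])
  ++ (if 79 < x.length then [(PySem.List.slice x (some 50) (some 75)).sum, x.getD 79 0] else [])

def convert_out_to_five_splicing_sites_for_5ss_alt (splicingdist : List (List Int)) : List (List Int) :=
  splicingdist.map pvRowB

-- ===== PRECONDITION & SPEC =====
def Spec_convert_out_to_five_splicing_sites_for_5ss (splicingdist : List (List Int)) (out : List (List Int)) : Prop := out = convert_out_to_five_splicing_sites_for_5ss_alt splicingdist
instance (splicingdist : List (List Int)) (out : List (List Int)) : Decidable (Spec_convert_out_to_five_splicing_sites_for_5ss splicingdist out) := by unfold Spec_convert_out_to_five_splicing_sites_for_5ss; infer_instance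

-- ===== CLAIM (what is proved, stated in full; the proofs are below) =====
def Claim_equal_convert_out_to_five_splicing_sites_for_5ss : Prop := ∀ (splicingdist : List (List Int)), Dom_convert_out_to_five_splicing_sites_for_5ss splicingdist → Spec_convert_out_to_five_splicing_sites_for_5ss splicingdist (convert_out_to_five_splicing_sites_for_5ss splicingdist)

-- ===== LEMMAS AND PROOFS =====

-- partial sum of x.getD over indices [a, min n b)
def pvSeg (x : List Int) (a n b : Nat) : Int :=
  ((List.range' a (min n b - a)).map (fun j => x.getD j 0)).sum

-- A's accumulator s after processing indices < n
def pvS (x : List Int) (n : Nat) : Int :=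
  if n ≤ 44 then pvSeg x 7 n 32 else if n ≤ 79 then pvSeg x 50 n 75 else 0

-- A's vec after processing indices < n
def pvV (x : List Int) (n : Nat) : List Int :=
  (if 0 < n then [x.getD 0 0] else [])
  ++ (if 44 < n then [pvSeg x 7 44 32, x.getD 44 0] else [])
  ++ (if 79 < n then [pvSeg x 50 79 75, x.getD 79 0] else [])

theorem pvSeg_succ (x : List Int) (a n b : Nat) (h1 : a ≤ n) (h2 : n < b) :
    pvSeg x a (n + 1) b = pvSeg x a n b + x.getD n 0 := by
  unfold pvSeg
  have hmin : min (n + 1) b - a = (min n b - a) + 1 := by omega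
  have ha : a + (min n b - a) = n := by omega
  rw [hmin, List.range'_1_concat]
  simp [ha]

theorem pvSeg_stable (x : List Int) (a n b : Nat) (h : ¬ (a ≤ n ∧ n < b)) :
    pvSeg x a (n + 1) b = pvSeg x a n b := by
  unfold pvSeg
  rcases Nat.lt_or_ge n a with hna | hna
  · have : min (n + 1) b - a = min n b - a := by omega
    rw [this]
  · have hb : b ≤ n := by omega
    have : min (n + 1) b = min n b := by omega
    rw [this]

theorem pvV_succ_stable (x : List Int) (n : Nat) (h0 : n ≠ 0) (h44 : n ≠ 44) (h79 : n ≠ 79) :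
    pvV x (n + 1) = pvV x n := by
  unfold pvV
  by_cases c2 : 44 < n <;> by_cases c3 : 79 < n <;>
    simp only [if_pos (show 0 < n + 1 by omega), if_pos (show 0 < n by omega)] <;>
    first
      | exact absurd c3 (by omega)
      | rw [if_pos (show 44 < n + 1 by omega), if_pos c2, if_pos (show 79 < n + 1 by omega), if_pos c3]
      | rw [if_pos (show 44 < n + 1 by omega), if_pos c2, if_neg (show ¬ 79 < n + 1 by omega), if_neg c3]
      | rw [if_neg (show ¬ 44 < n + 1 by omega), if_neg c2, if_neg (show ¬ 79 < n + 1 by omega), if_neg c3]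

theorem pvFoldA_eq (x : List Int) (n : Nat) :
    (List.range n).foldl (pvStepA x) (0, []) = (pvS x n, pvV x n) := by
  induction n with
  | zero => simp [pvS, pvV, pvSeg]
  | succ n ih =>
    rw [List.range_succ, List.foldl_append, ih]
    simp only [List.foldl_cons, List.foldl_nil]
    unfold pvStepA
    by_cases h0 : n = 0
    · subst h0
      simp [pvS, pvV, pvSeg]
    by_cases h44 : n = 44
    · subst h44
      norm_num [pvS, pvV, pvSeg]
    by_cases h79 : n = 79
    · subst h79
      norm_num [pvS, pvV, pvSeg]
    by_cases hacc : (6 < n ∧ n < 32) ∨ (49 < n ∧ n < 75)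
    · rw [if_neg h0, if_neg (by rintro (h | h) <;> omega), if_pos hacc]
      have hv := pvV_succ_stable x n h0 h44 h79
      have hs : pvS x (n + 1) = pvS x n + x.getD n 0 := by
        unfold pvS
        rcases hacc with ⟨ha1, ha2⟩ | ⟨ha1, ha2⟩
        · rw [if_pos (show n + 1 ≤ 44 by omega), if_pos (show n ≤ 44 by omega),
            pvSeg_succ x 7 n 32 (by omega) (by omega)]
        · rw [if_neg (show ¬ n + 1 ≤ 44 by omega), if_neg (show ¬ n ≤ 44 by omega),
            if_pos (show n + 1 ≤ 79 by omega), if_pos (show n ≤ 79 by omega),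
            pvSeg_succ x 50 n 75 (by omega) (by omega)]
      rw [hv, hs]
    · rw [if_neg h0, if_neg (by rintro (h | h) <;> omega), if_neg hacc]
      have hv := pvV_succ_stable x n h0 h44 h79
      have hs : pvS x (n + 1) = pvS x n := by
        unfold pvS
        by_cases c1 : n ≤ 44 <;> by_cases c2 : n ≤ 79
        · rw [if_pos (show n + 1 ≤ 44 by omega), if_pos c1,
            pvSeg_stable x 7 n 32 (by omega)]
        · exact absurd c2 (by omega)
        · rw [if_neg (show ¬ n + 1 ≤ 44 by omega), if_neg c1,
            if_pos (show n + 1 ≤ 79 by omega), if_pos c2,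
            pvSeg_stable x 50 n 75 (by omega)]
        · rw [if_neg (show ¬ n + 1 ≤ 44 by omega), if_neg c1,
            if_neg (show ¬ n + 1 ≤ 79 by omega), if_neg c2]
      rw [hv, hs]

theorem pvSeg_full (x : List Int) (a n b : Nat) (hab : a ≤ b) (hbn : b ≤ n) (hb : b ≤ x.length) :
    pvSeg x a n b = ((x.drop a).take (b - a)).sum := by
  unfold pvSeg
  have hmin : min n b = b := by omega
  rw [hmin]
  congr 1
  apply List.ext_getElem
  · simp; omega
  · intro i h1 h2
    simp only [List.getElem_map, List.getElem_range', List.getElem_take, List.getElem_drop]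
    have hlen : a + i < x.length := by simp at h1; omega
    rw [List.getD_eq_getElem _ _ (by omega)]
    congr 1
    omega

theorem pvRow_eq (x : List Int) : pvRowA x = pvRowB x := by
  unfold pvRowA pvRowB
  rw [pvFoldA_eq]
  simp only
  unfold pvV
  congr 1
  congr 1
  · by_cases c2 : 44 < x.length
    · rw [if_pos c2, if_pos c2]
      have hs : PySem.List.slice x (some 7) (some 32) = (x.drop 7).take 25 := by
        simp [pysem]
      rw [hs, pvSeg_full x 7 44 32 (by omega) (by omega) (by omega)]
    · rw [if_neg c2, if_neg c2]
  · by_cases c3 : 79 < x.length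
    · rw [if_pos c3, if_pos c3]
      have hs : PySem.List.slice x (some 50) (some 75) = (x.drop 50).take 25 := by
        simp [pysem]
      rw [hs, pvSeg_full x 50 79 75 (by omega) (by omega) (by omega)]
    · rw [if_neg c3, if_neg c3]

-- ===== VERDICT (by name: the statement is the Claim_ definition above) =====
theorem convert_out_to_five_splicing_sites_for_5ss_spec : Claim_equal_convert_out_to_five_splicing_sites_for_5ss := by
  intro sd _
  unfold Spec_convert_out_to_five_splicing_sites_for_5ss convert_out_to_five_splicing_sites_for_5ss convert_out_to_five_splicing_sites_for_5ss_alt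
  rw [PySem.List.foldl_append_singleton_eq_map]
  exact List.map_congr_left (fun x _ => pvRow_eq x)
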